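-- pv_equiv track=rewrite | github.com/Julianb233/Better-together | Large Language Model Training/scripts/data_processing/process_and_score.py | categorize_by_type
-- ===== SOURCE A (Python) =====
-- from typing import List, Dict, Any, Optional
--
-- def categorize_by_type(data_points: List[Dict]) -> Dict[str, List[Dict]]:
--     """
--     Categorize data points by training category
--
--     Args:
--         data_points: List of data points
--
--     Returns:
--         Dictionary of category -> data points
--     """
--     categories = {
--         "instruction_following": [],
--         "contextual_understanding": [],
--         "empathetic_dialogue": [],
--         "personalization": [],
--         "safety_ethics": []
--     }
--
--     for point in data_points:
--         category = point['metadata'].get('category', 'instruction_following')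
--
--         # Map to training categories
--         if category in ['advice', 'coaching', 'conflict_resolution']:
--             categories['instruction_following'].append(point)
--         elif category in ['date_suggestion', 'personalization']:
--             categories['contextual_understanding'].append(point)
--         elif category in ['daily_reflection', 'emotional_support']:
--             categories['empathetic_dialogue'].append(point)
--         elif category in ['personalization', 'love_language_adaptation']:
--             categories['personalization'].append(point)
--         elif category in ['safety_ethics', 'crisis_intervention']:
--             categories['safety_ethics'].append(point)
--         else:
--             categories['instruction_following'].append(point)
--
--     return categories
-- ===== SOURCE B (Python) =====
-- BUCKETS = ["instruction_following", "contextual_understanding",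
--            "empathetic_dialogue", "personalization", "safety_ethics"]
--
-- CATEGORY_MAP = {
--     "advice": "instruction_following",
--     "coaching": "instruction_following",
--     "conflict_resolution": "instruction_following",
--     "date_suggestion": "contextual_understanding",
--     "personalization": "contextual_understanding",  # first match in A's chain wins
--     "daily_reflection": "empathetic_dialogue",
--     "emotional_support": "empathetic_dialogue",
--     "love_language_adaptation": "personalization",
--     "safety_ethics": "safety_ethics",
--     "crisis_intervention": "safety_ethics",
-- }
--
-- def _bucket(point):
--     cat = point['metadata'].get('category', 'instruction_following')
--     return CATEGORY_MAP.get(cat, 'instruction_following')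
--
-- def categorize_by_type(data_points):
--     # bucket-major: build each bucket as one filtering pass over the data
--     return {b: [p for p in data_points if _bucket(p) == b] for b in BUCKETS}
-- ===== Notes on version B (the rewrite author's own statement) =====
-- stated objective: alternative
-- what changed: Bucket-major decomposition: instead of A's single point-major loop that appends each point to the bucket chosen by an if/elif chain, B builds the result as a dict comprehension over the five buckets, each bucket being one filtering pass of the data through a precomputed category-to-bucket map.
import Mathlib
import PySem

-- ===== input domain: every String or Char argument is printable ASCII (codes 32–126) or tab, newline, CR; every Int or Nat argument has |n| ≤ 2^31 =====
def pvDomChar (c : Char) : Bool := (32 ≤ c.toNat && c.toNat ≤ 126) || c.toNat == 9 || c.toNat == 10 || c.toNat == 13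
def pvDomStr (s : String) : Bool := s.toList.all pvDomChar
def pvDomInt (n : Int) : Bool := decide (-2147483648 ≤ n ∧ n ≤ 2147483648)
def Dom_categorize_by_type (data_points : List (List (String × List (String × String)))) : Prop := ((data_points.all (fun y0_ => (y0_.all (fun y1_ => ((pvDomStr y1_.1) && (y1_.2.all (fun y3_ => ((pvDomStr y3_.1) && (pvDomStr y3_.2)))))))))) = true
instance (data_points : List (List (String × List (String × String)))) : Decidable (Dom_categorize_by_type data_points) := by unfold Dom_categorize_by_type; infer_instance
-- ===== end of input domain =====

-- B is a bucket-major decomposition: each of the five buckets is built by one filtering pass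
-- over the data through a precomputed category→bucket map, instead of A's point-major append loop.

-- ===== PORT A =====
-- literal port of A's loop body: read category, then the if/elif chain appends to the chosen bucket
def pvStepA (cats : PySem.Dict String (List (List (String × List (String × String)))))
    (point : List (String × List (String × String))) :
    PySem.Dict String (List (List (String × List (String × String)))) :=
  let category := (PySem.Dict.mk (((PySem.Dict.mk point).get? "metadata").getD [])).getD "category" "instruction_following"
  if category ∈ ["advice", "coaching", "conflict_resolution"] then
    cats.modify "instruction_following" [] (· ++ [point])
  else if category ∈ ["date_suggestion", "personalization"] then
    cats.modify "contextual_understanding" [] (· ++ [point])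
  else if category ∈ ["daily_reflection", "emotional_support"] then
    cats.modify "empathetic_dialogue" [] (· ++ [point])
  else if category ∈ ["personalization", "love_language_adaptation"] then
    cats.modify "personalization" [] (· ++ [point])
  else if category ∈ ["safety_ethics", "crisis_intervention"] then
    cats.modify "safety_ethics" [] (· ++ [point])
  else
    cats.modify "instruction_following" [] (· ++ [point])

def categorize_by_type (data_points : List (List (String × List (String × String)))) : List (String × List (List (String × List (String × String)))) :=
  let categories : PySem.Dict String (List (List (String × List (String × String)))) :=
    PySem.Dict.mk [("instruction_following", []), ("contextual_understanding", []),
      ("empathetic_dialogue", []), ("personalization", []), ("safety_ethics", [])]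
  (data_points.foldl pvStepA categories).items

-- ===== PORT B =====
def BUCKETS : List String :=
  ["instruction_following", "contextual_understanding", "empathetic_dialogue",
   "personalization", "safety_ethics"]

def CATEGORY_MAP : PySem.Dict String String :=
  PySem.Dict.mk [("advice", "instruction_following"), ("coaching", "instruction_following"),
    ("conflict_resolution", "instruction_following"), ("date_suggestion", "contextual_understanding"),
    ("personalization", "contextual_understanding"), ("daily_reflection", "empathetic_dialogue"),
    ("emotional_support", "empathetic_dialogue"), ("love_language_adaptation", "personalization"),
    ("safety_ethics", "safety_ethics"), ("crisis_intervention", "safety_ethics")]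

-- port of Source B's _bucket helper
def pvBucket (point : List (String × List (String × String))) : String :=
  let cat := (PySem.Dict.mk (((PySem.Dict.mk point).get? "metadata").getD [])).getD "category" "instruction_following"
  CATEGORY_MAP.getD cat "instruction_following"

-- port of Source B's dict comprehension: for each bucket, one filtering pass over the data
def categorize_by_type_alt (data_points : List (List (String × List (String × String)))) : List (String × List (List (String × List (String × String)))) :=
  BUCKETS.map (fun b => (b, data_points.filter (fun p => pvBucket p == b)))

-- ===== PRECONDITION & SPEC =====
-- Pre_ excludes points lacking the 'metadata' key: Python A raises KeyError there (so does B).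
def Pre_categorize_by_type (data_points : List (List (String × List (String × String)))) : Prop :=
  ∀ point ∈ data_points, (PySem.Dict.mk point).contains "metadata" = true
instance (data_points : List (List (String × List (String × String)))) : Decidable (Pre_categorize_by_type data_points) := by unfold Pre_categorize_by_type; infer_instance
def pvWitness_categorize_by_type : (List (List (String × List (String × String)))) :=
  [[("metadata", [("category", "advice")])], [("metadata", [])]]
def Spec_categorize_by_type (data_points : List (List (String × List (String × String)))) (out : List (String × List (List (String × List (String × String))))) : Prop := out = categorize_by_type_alt data_points
instance (data_points : List (List (String × List (String × String)))) (out : List (String × List (List (String × List (String × String))))) : Decidable (Spec_categorize_by_type data_points out) := by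
  unfold Spec_categorize_by_type
  letI d1 : DecidableEq (List (String × List (String × String))) := inferInstance
  letI d2 : DecidableEq (List (List (String × List (String × String)))) := inferInstance
  letI d3 : DecidableEq (String × List (List (String × List (String × String)))) := inferInstance
  infer_instance

-- ===== CLAIM (what is proved, stated in full; the proofs are below) =====
def Claim_equal_categorize_by_type : Prop := ∀ (data_points : List (List (String × List (String × String)))), Dom_categorize_by_type data_points → Pre_categorize_by_type data_points → Spec_categorize_by_type data_points (categorize_by_type data_points)

-- ===== LEMMAS AND PROOFS =====

-- the bucket chosen by A's if/elif chain, for every category string, equals B's CATEGORY_MAP lookup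
lemma target_eq (c : String) :
    (if c = "advice" ∨ c = "coaching" ∨ c = "conflict_resolution" then "instruction_following"
     else if c = "date_suggestion" ∨ c = "personalization" then "contextual_understanding"
     else if c = "daily_reflection" ∨ c = "emotional_support" then "empathetic_dialogue"
     else if c = "personalization" ∨ c = "love_language_adaptation" then "personalization"
     else if c = "safety_ethics" ∨ c = "crisis_intervention" then "safety_ethics"
     else "instruction_following")
    = CATEGORY_MAP.getD c "instruction_following" := by
  by_cases h1 : c = "advice"
  · subst h1; decide
  by_cases h2 : c = "coaching"
  · subst h2; decide
  by_cases h3 : c = "conflict_resolution"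
  · subst h3; decide
  by_cases h4 : c = "date_suggestion"
  · subst h4; decide
  by_cases h5 : c = "personalization"
  · subst h5; decide
  by_cases h6 : c = "daily_reflection"
  · subst h6; decide
  by_cases h7 : c = "emotional_support"
  · subst h7; decide
  by_cases h8 : c = "love_language_adaptation"
  · subst h8; decide
  by_cases h9 : c = "safety_ethics"
  · subst h9; decide
  by_cases h10 : c = "crisis_intervention"
  · subst h10; decide
  simp only [CATEGORY_MAP, PySem.Dict.getD, PySem.Dict.get?]
  rw [List.find?_cons_of_neg (by simp [beq_iff_eq]; exact Ne.symm h1)]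
  rw [List.find?_cons_of_neg (by simp [beq_iff_eq]; exact Ne.symm h2)]
  rw [List.find?_cons_of_neg (by simp [beq_iff_eq]; exact Ne.symm h3)]
  rw [List.find?_cons_of_neg (by simp [beq_iff_eq]; exact Ne.symm h4)]
  rw [List.find?_cons_of_neg (by simp [beq_iff_eq]; exact Ne.symm h5)]
  rw [List.find?_cons_of_neg (by simp [beq_iff_eq]; exact Ne.symm h6)]
  rw [List.find?_cons_of_neg (by simp [beq_iff_eq]; exact Ne.symm h7)]
  rw [List.find?_cons_of_neg (by simp [beq_iff_eq]; exact Ne.symm h8)]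
  rw [List.find?_cons_of_neg (by simp [beq_iff_eq]; exact Ne.symm h9)]
  rw [List.find?_cons_of_neg (by simp [beq_iff_eq]; exact Ne.symm h10)]
  simp [h1, h2, h3, h4, h5, h6, h7, h8, h9, h10]

-- A's loop body is a modify at the bucket B computes for the point
lemma pvStepA_eq (cats : PySem.Dict String (List (List (String × List (String × String)))))
    (point : List (String × List (String × String))) :
    pvStepA cats point = cats.modify (pvBucket point) [] (· ++ [point]) := by
  simp only [pvStepA, pvBucket, List.mem_cons, List.not_mem_nil, or_false]
  rw [← target_eq]
  split_ifs <;> rfl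

-- for every category string, B's map lookup lands in one of the five buckets
lemma getD_mem (c : String) : CATEGORY_MAP.getD c "instruction_following" ∈ BUCKETS := by
  rcases h : CATEGORY_MAP.get? c with _ | v
  · rw [PySem.Dict.getD_of_get?_eq_none _ _ h]; decide
  · rw [PySem.Dict.getD_of_get?_eq_some _ _ h]
    have hm := PySem.Dict.mem_items_of_get?_eq_some _ h
    simp only [CATEGORY_MAP, List.mem_cons, List.not_mem_nil, or_false,
      Prod.mk.injEq] at hm
    rcases hm with ⟨_, rfl⟩ | ⟨_, rfl⟩ | ⟨_, rfl⟩ | ⟨_, rfl⟩ | ⟨_, rfl⟩ | ⟨_, rfl⟩ | ⟨_, rfl⟩ |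
      ⟨_, rfl⟩ | ⟨_, rfl⟩ | ⟨_, rfl⟩ <;> decide

-- B's bucket is always one of the five keys
lemma pvBucket_mem (point : List (String × List (String × String))) :
    pvBucket point ∈ BUCKETS := getD_mem _

-- loop invariant: folding A's step over pts appends, to each of the five buckets,
-- exactly the points whose pvBucket is that bucket, in order
lemma fold_items (pts : List (List (String × List (String × String))))
    (a1 a2 a3 a4 a5 : List (List (String × List (String × String)))) :
    (pts.foldl pvStepA (PySem.Dict.mk
      [("instruction_following", a1), ("contextual_understanding", a2),
       ("empathetic_dialogue", a3), ("personalization", a4), ("safety_ethics", a5)])) =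
    PySem.Dict.mk
      [("instruction_following", a1 ++ pts.filter (fun p => pvBucket p == "instruction_following")),
       ("contextual_understanding", a2 ++ pts.filter (fun p => pvBucket p == "contextual_understanding")),
       ("empathetic_dialogue", a3 ++ pts.filter (fun p => pvBucket p == "empathetic_dialogue")),
       ("personalization", a4 ++ pts.filter (fun p => pvBucket p == "personalization")),
       ("safety_ethics", a5 ++ pts.filter (fun p => pvBucket p == "safety_ethics"))] := by
  induction pts generalizing a1 a2 a3 a4 a5 with
  | nil => simp
  | cons p pts ih =>
    rw [List.foldl_cons, pvStepA_eq]
    have hmem := pvBucket_mem p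
    simp only [BUCKETS, List.mem_cons, List.not_mem_nil, or_false] at hmem
    rcases hmem with h | h | h | h | h
    · rw [h]
      have hm : (PySem.Dict.mk
          [("instruction_following", a1), ("contextual_understanding", a2),
           ("empathetic_dialogue", a3), ("personalization", a4), ("safety_ethics", a5)]).modify
          "instruction_following" [] (· ++ [p]) = PySem.Dict.mk [("instruction_following", a1 ++ [p]), ("contextual_understanding", a2), ("empathetic_dialogue", a3), ("personalization", a4), ("safety_ethics", a5)] := rfl
      rw [hm, ih]
      simp [h, List.append_assoc]
    · rw [h]
      have hm : (PySem.Dict.mk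
          [("instruction_following", a1), ("contextual_understanding", a2),
           ("empathetic_dialogue", a3), ("personalization", a4), ("safety_ethics", a5)]).modify
          "contextual_understanding" [] (· ++ [p]) = PySem.Dict.mk [("instruction_following", a1), ("contextual_understanding", a2 ++ [p]), ("empathetic_dialogue", a3), ("personalization", a4), ("safety_ethics", a5)] := rfl
      rw [hm, ih]
      simp [h, List.append_assoc]
    · rw [h]
      have hm : (PySem.Dict.mk
          [("instruction_following", a1), ("contextual_understanding", a2),
           ("empathetic_dialogue", a3), ("personalization", a4), ("safety_ethics", a5)]).modify
          "empathetic_dialogue" [] (· ++ [p]) = PySem.Dict.mk [("instruction_following", a1), ("contextual_understanding", a2), ("empathetic_dialogue", a3 ++ [p]), ("personalization", a4), ("safety_ethics", a5)] := rfl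
      rw [hm, ih]
      simp [h, List.append_assoc]
    · rw [h]
      have hm : (PySem.Dict.mk
          [("instruction_following", a1), ("contextual_understanding", a2),
           ("empathetic_dialogue", a3), ("personalization", a4), ("safety_ethics", a5)]).modify
          "personalization" [] (· ++ [p]) = PySem.Dict.mk [("instruction_following", a1), ("contextual_understanding", a2), ("empathetic_dialogue", a3), ("personalization", a4 ++ [p]), ("safety_ethics", a5)] := rfl
      rw [hm, ih]
      simp [h, List.append_assoc]
    · rw [h]
      have hm : (PySem.Dict.mk
          [("instruction_following", a1), ("contextual_understanding", a2),
           ("empathetic_dialogue", a3), ("personalization", a4), ("safety_ethics", a5)]).modify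
          "safety_ethics" [] (· ++ [p]) = PySem.Dict.mk [("instruction_following", a1), ("contextual_understanding", a2), ("empathetic_dialogue", a3), ("personalization", a4), ("safety_ethics", a5 ++ [p])] := rfl
      rw [hm, ih]
      simp [h, List.append_assoc]

theorem categorize_by_type_spec : Claim_equal_categorize_by_type := by
  intro data_points _ _
  unfold Spec_categorize_by_type
  show (data_points.foldl pvStepA (PySem.Dict.mk
      [("instruction_following", []), ("contextual_understanding", []),
       ("empathetic_dialogue", []), ("personalization", []), ("safety_ethics", [])])).items
    = categorize_by_type_alt data_points
  rw [fold_items]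
  rfl
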